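-- pv_equiv track=rewrite | github.com/Joenhle/leetcode | python/最大子段和.py | get_dp2
-- ===== SOURCE A (Python) =====
-- def get_dp2(arr):
--     n = len(arr)
--     dp = [[0 for i in range(n)] for j in range(n)]
--     for i in range(n-1, -1, -1):
--         dp[i][i] = arr[i]
--         res = arr[i]
--         for j in range(i-1, -1, -1):
--             dp[j][i] = dp[j+1][i]
--             res += arr[j]
--             if res > dp[j][i]:
--                 dp[j][i] = res
--     return dp
-- ===== SOURCE B (Python) =====
-- def get_dp2(arr):
--     # Per-row Kadane scan: each row j is computed independently with a running
--     # segment sum s and running minimum prefix-sum m, so dp[j][i] = s - m.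
--     # No cross-row DP recurrence at all.
--     n = len(arr)
--     dp = []
--     for j in range(n):
--         row = [0] * n
--         s = 0
--         m = 0
--         for i in range(j, n):
--             m = min(m, s)
--             s += arr[i]
--             row[i] = s - m
--         dp.append(row)
--     return dp
-- ===== Notes on version B (the rewrite author's own statement) =====
-- stated objective: alternative
-- what changed: Replaces A's cross-row DP recurrence dp[j][i]=max(dp[j+1][i],segment sum) by an independent per-row Kadane-style scan: each row j is built on its own with a running segment sum s and a running minimum prefix-sum m, setting dp[j][i]=s-m, so no row ever reads another row.
import Mathlib
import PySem

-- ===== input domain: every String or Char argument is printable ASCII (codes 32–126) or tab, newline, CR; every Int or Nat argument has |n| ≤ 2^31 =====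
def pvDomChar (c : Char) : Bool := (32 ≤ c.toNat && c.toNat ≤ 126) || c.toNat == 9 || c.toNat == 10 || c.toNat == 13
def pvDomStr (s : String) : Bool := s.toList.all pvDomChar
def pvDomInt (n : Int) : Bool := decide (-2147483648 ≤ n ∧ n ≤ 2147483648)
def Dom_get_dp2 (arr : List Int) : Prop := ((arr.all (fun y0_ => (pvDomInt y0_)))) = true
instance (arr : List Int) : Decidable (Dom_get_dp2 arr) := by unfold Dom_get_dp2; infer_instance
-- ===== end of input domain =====

-- B replaces A's cross-row DP recurrence by an independent per-row Kadane-style scan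
-- (running segment sum minus running minimum prefix-sum); alternative algorithm, same cost.

-- table read dp[r][c] (every index either Python uses is in range, so getD is exact)
def get2 (dp : List (List Int)) (r c : Nat) : Int := (dp.getD r []).getD c 0
-- table write dp[r][c] = v
def set2 (dp : List (List Int)) (r c : Nat) (v : Int) : List (List Int) :=
  dp.set r ((dp.getD r []).set c v)

-- ===== PORT A =====
-- body of A's inner loop: dp[j][i] = dp[j+1][i]; res += arr[j]; if res > dp[j][i]: dp[j][i] = res
def innerA (arr : List Int) (i : Nat) (st : List (List Int) × Int) (j : Nat) :
    List (List Int) × Int :=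
  let dp := set2 st.1 j i (get2 st.1 (j+1) i)
  let res := st.2 + arr.getD j 0
  (if res > get2 dp j i then set2 dp j i res else dp, res)

-- body of A's outer loop; (List.range i).reverse is range(i-1, -1, -1)
def outerA (arr : List Int) (dp : List (List Int)) (i : Nat) : List (List Int) :=
  let dp := set2 dp i i (arr.getD i 0)
  ((List.range i).reverse.foldl (innerA arr i) (dp, arr.getD i 0)).1

-- (List.range n).reverse is range(n-1, -1, -1)
def get_dp2 (arr : List Int) : List (List Int) :=
  let n := arr.length
  (List.range n).reverse.foldl (outerA arr) (List.replicate n (List.replicate n 0))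

-- ===== PORT B =====
-- body of B's inner loop: m = min(m, s); s += arr[i]; row[i] = s - m
-- state is (row, s, m)
def innerB (arr : List Int) (st : List Int × Int × Int) (i : Nat) : List Int × Int × Int :=
  let m := min st.2.2 st.2.1
  let s := st.2.1 + arr.getD i 0
  (st.1.set i (s - m), s, m)

-- one row of B: row = [0]*n; s = 0; m = 0; for i in range(j, n): …
def rowB (arr : List Int) (j : Nat) : List Int :=
  ((List.range' j (arr.length - j)).foldl (innerB arr) (List.replicate arr.length 0, 0, 0)).1

-- dp = []; for j in range(n): … ; dp.append(row)
def get_dp2_alt (arr : List Int) : List (List Int) :=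
  (List.range arr.length).foldl (fun dp j => dp ++ [rowB arr j]) []

-- ===== PRECONDITION & SPEC =====
def Spec_get_dp2 (arr : List Int) (out : List (List Int)) : Prop := out = get_dp2_alt arr
instance (arr : List Int) (out : List (List Int)) : Decidable (Spec_get_dp2 arr out) := by unfold Spec_get_dp2; infer_instance

-- ===== CLAIM (what is proved, stated in full; the proofs are below) =====
def Claim_equal_get_dp2 : Prop := ∀ (arr : List Int), Dom_get_dp2 arr → Spec_get_dp2 arr (get_dp2 arr)

-- ===== LEMMAS AND PROOFS =====

theorem getD_set_self {α : Type} (l : List α) (i : Nat) (a d : α) (h : i < l.length) :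
    (l.set i a).getD i d = a := by
  simp [List.getD, h]

theorem getD_set_ne {α : Type} (l : List α) {i j : Nat} (a d : α) (h : i ≠ j) :
    (l.set i a).getD j d = l.getD j d := by
  simp [List.getD, List.getElem?_set_ne h]

-- sum of arr[j..i]
def seg (arr : List Int) (j i : Nat) : Int := ((arr.drop j).take (i + 1 - j)).sum

-- best sum of a subarray of arr[j..i] ending at i (the value both tables hold at (j,i))
def F (arr : List Int) (j i : Nat) : Int :=
  if i ≤ j then arr.getD j 0 else max (F arr (j+1) i) (seg arr j i)
termination_by i - j

def Shape (n : Nat) (dp : List (List Int)) : Prop :=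
  dp.length = n ∧ ∀ r, r < n → (dp.getD r []).length = n

theorem shape_set2 {n : Nat} {dp : List (List Int)} (h : Shape n dp) (r c : Nat) (v : Int) :
    Shape n (set2 dp r c v) := by
  obtain ⟨h1, h2⟩ := h
  refine ⟨by simp [set2, h1], ?_⟩
  intro r' hr'
  by_cases hrr : r = r'
  · subst hrr
    rw [set2, getD_set_self _ _ _ _ (by omega), List.length_set]
    exact h2 r hr'
  · rw [set2, getD_set_ne _ _ _ hrr]
    exact h2 r' hr'

theorem get2_set2_self {n : Nat} {dp : List (List Int)} (h : Shape n dp) {r c : Nat}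
    (hr : r < n) (hc : c < n) (v : Int) : get2 (set2 dp r c v) r c = v := by
  obtain ⟨h1, h2⟩ := h
  rw [get2, set2, getD_set_self _ _ _ _ (by omega), getD_set_self _ _ _ _ (by rw [h2 r hr]; omega)]

theorem get2_set2_other {dp : List (List Int)} {r c r' c' : Nat}
    (h : r' ≠ r ∨ c' ≠ c) (v : Int) : get2 (set2 dp r c v) r' c' = get2 dp r' c' := by
  by_cases hrr : r = r'
  · subst hrr
    have hcc : c ≠ c' := by tauto
    by_cases hlt : r < dp.length
    · rw [get2, set2, getD_set_self _ _ _ _ hlt, getD_set_ne _ _ _ hcc, get2]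
    · rw [get2, set2, List.set_eq_of_length_le (by omega), get2]
  · rw [get2, set2, getD_set_ne _ _ _ hrr, get2]

theorem table_ext {n : Nat} {dp dp' : List (List Int)} (h : Shape n dp) (h' : Shape n dp')
    (he : ∀ r c, r < n → c < n → get2 dp r c = get2 dp' r c) : dp = dp' := by
  obtain ⟨h1, h2⟩ := h
  obtain ⟨h1', h2'⟩ := h'
  apply List.ext_getElem (by omega)
  intro r hr hr'
  have hrn : r < n := by omega
  have grow : dp.getD r [] = dp[r] := List.getD_eq_getElem _ _ hr
  have grow' : dp'.getD r [] = dp'[r] := List.getD_eq_getElem _ _ hr'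
  apply List.ext_getElem (by rw [← grow, ← grow', h2 r hrn, h2' r hrn])
  intro c hc hc'
  have hcn : c < n := by rw [← grow, h2 r hrn] at hc; omega
  have := he r c hrn hcn
  rw [get2, get2, grow, grow', List.getD_eq_getElem _ _ hc, List.getD_eq_getElem _ _ hc'] at this
  exact this

theorem seg_self {arr : List Int} {i : Nat} (h : i < arr.length) :
    seg arr i i = arr.getD i 0 := by
  simp [seg, List.take_one, List.head?_drop, List.getD, List.getElem?_eq_getElem h]

theorem seg_cons {arr : List Int} {j i : Nat} (hj : j < i) (hi : i < arr.length) :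
    seg arr j i = arr.getD j 0 + seg arr (j+1) i := by
  have hj' : j < arr.length := by omega
  have hdrop : arr.drop j = arr[j] :: arr.drop (j+1) := List.drop_eq_getElem_cons hj'
  rw [seg, hdrop, show i + 1 - j = (i - j) + 1 by omega, List.take_succ_cons, List.sum_cons,
    seg, show i + 1 - (j + 1) = i - j by omega]
  simp [List.getD, List.getElem?_eq_getElem hj']

theorem seg_snoc {arr : List Int} {j i : Nat} (hj : j ≤ i) (hi : i + 1 < arr.length) :
    seg arr j (i+1) = seg arr j i + arr.getD (i+1) 0 := by
  have hlen : i + 1 - j < (arr.drop j).length := by simp [List.length_drop]; omega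
  rw [seg, show i + 1 + 1 - j = (i + 1 - j) + 1 by omega, List.take_add_one,
    List.getElem?_eq_getElem hlen]
  simp [seg, List.getElem_drop, List.getD, List.getElem?_eq_getElem hi,
    show j + (i + 1 - j) = i + 1 by omega]

theorem F_self (arr : List Int) (i : Nat) : F arr i i = arr.getD i 0 := by
  rw [F]; simp

theorem F_step {arr : List Int} {j i : Nat} (h : j < i) :
    F arr j i = max (F arr (j+1) i) (seg arr j i) := by
  rw [F]; simp [Nat.not_le.2 h]

-- Kadane recurrence for F along a row: F j (i+1) = max (F j i + arr[i+1]) (arr[i+1])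
theorem F_kadane (arr : List Int) :
    ∀ (d j : Nat), j + d + 1 < arr.length →
      F arr j (j + d + 1) = max (F arr j (j + d) + arr.getD (j + d + 1) 0)
        (arr.getD (j + d + 1) 0) := by
  intro d
  induction d with
  | zero =>
      intro j h
      rw [F_step (by omega : j < j + 0 + 1)]
      have h1 : seg arr j (j + 0 + 1) = seg arr j j + arr.getD (j + 1) 0 := by
        have := seg_snoc (arr := arr) (le_refl j) (by omega : j + 1 < arr.length)
        simpa using this
      simp only [Nat.add_zero] at *
      rw [h1, seg_self (by omega : j < arr.length), F_self, F_self]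
      omega
  | succ d ih =>
      intro j h
      have hih := ih (j+1) (by omega)
      rw [show j + 1 + d + 1 = j + (d+1) + 1 by omega,
        show j + 1 + d = j + (d + 1) by omega] at hih
      rw [F_step (by omega : j < j + (d+1) + 1), hih,
        seg_snoc (by omega : j ≤ j + (d+1)) (by omega : j + (d+1) + 1 < arr.length),
        F_step (by omega : j < j + (d+1))]
      omega

-- generic invariant lemma for a foldl over (List.range t).reverse (i.e. range(t-1,-1,-1))
theorem foldRevInv {σ : Type} (step : σ → Nat → σ) (Inv : Nat → σ → Prop)
    (hstep : ∀ t s, Inv (t+1) s → Inv t (step s t)) :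
    ∀ t s, Inv t s → Inv 0 ((List.range t).reverse.foldl step s) := by
  intro t
  induction t with
  | zero => intro s h; simpa using h
  | succ t ih =>
      intro s h
      rw [List.range_succ, List.reverse_append]
      exact ih (step s t) (hstep t s h)

-- generic invariant lemma for a foldl over List.range' a k (i.e. range(a, a+k))
theorem foldFwdInv {σ : Type} (step : σ → Nat → σ) (Inv : Nat → σ → Prop) :
    ∀ (k a : Nat) (s : σ),
      (∀ t s, a ≤ t → t < a + k → Inv t s → Inv (t+1) (step s t)) →
      Inv a s → Inv (a + k) ((List.range' a k).foldl step s) := by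
  intro k
  induction k with
  | zero => intro a s _ h; simpa using h
  | succ k ih =>
      intro a s hstep h
      rw [List.range'_succ, List.foldl_cons]
      have := ih (a+1) (step s a) (fun t s' ht ht' hI => hstep t s' (by omega) (by omega) hI)
        (hstep a s (le_refl a) (by omega) h)
      simpa [show a + 1 + k = a + (k + 1) by omega] using this

-- outer invariant of A: columns with index ≥ t are finished
def InvA (arr : List Int) (t : Nat) (dp : List (List Int)) : Prop :=
  t ≤ arr.length ∧ Shape arr.length dp ∧
    ∀ r c, r < arr.length → c < arr.length →
      get2 dp r c = if t ≤ c ∧ r ≤ c then F arr r c else 0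

-- inner invariant of A at column i: rows u..i of column i are done, res = seg u i
def InnA (arr : List Int) (i : Nat) (u : Nat) (st : List (List Int) × Int) : Prop :=
  u ≤ i ∧ Shape arr.length st.1 ∧ st.2 = seg arr u i ∧
    ∀ r c, r < arr.length → c < arr.length →
      get2 st.1 r c = if (i + 1 ≤ c ∧ r ≤ c) ∨ (c = i ∧ u ≤ r ∧ r ≤ i) then F arr r c else 0

-- inner invariant of B in row j: columns j..u-1 of the row are done, s/m track Kadane state
def InnB (arr : List Int) (j : Nat) (u : Nat) (st : List Int × Int × Int) : Prop :=
  j ≤ u ∧ u ≤ arr.length ∧ st.1.length = arr.length ∧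
    (∀ c, c < arr.length → st.1.getD c 0 = if j ≤ c ∧ c < u then F arr j c else 0) ∧
    (u = j → st.2.1 = 0 ∧ st.2.2 = 0) ∧
    (j < u → st.2.1 = seg arr j (u-1) ∧ st.2.1 - st.2.2 = F arr j (u-1))

theorem innA_step (arr : List Int) (i : Nat) (hi : i < arr.length) :
    ∀ u st, InnA arr i (u+1) st → InnA arr i u (innerA arr i st u) := by
  rintro j ⟨dp, res⟩ ⟨hu, hsh, hres, hcell⟩
  simp only at hsh hres hcell
  have hji : j < i := by omega
  have hjn : j < arr.length := by omega
  have hj1 : j + 1 < arr.length := by omega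
  have hF1 : get2 dp (j+1) i = F arr (j+1) i := by
    rw [hcell (j+1) i hj1 hi, if_pos (by omega)]
  have hsh1 : Shape arr.length (set2 dp j i (get2 dp (j+1) i)) := shape_set2 hsh _ _ _
  have hd1self : get2 (set2 dp j i (get2 dp (j+1) i)) j i = F arr (j+1) i := by
    rw [get2_set2_self hsh hjn hi, hF1]
  have hres' : res + arr.getD j 0 = seg arr j i := by
    rw [hres, seg_cons hji hi]; ring
  have key : innerA arr i (dp, res) j =
      (if seg arr j i > F arr (j+1) i
         then set2 (set2 dp j i (get2 dp (j+1) i)) j i (seg arr j i)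
         else set2 dp j i (get2 dp (j+1) i),
       seg arr j i) := by
    simp only [innerA, hd1self, hres']
  rw [key]
  by_cases hgt : seg arr j i > F arr (j+1) i
  · rw [if_pos hgt]
    refine ⟨by omega, shape_set2 hsh1 _ _ _, rfl, ?_⟩
    intro r c hr hc
    by_cases hrc : r = j ∧ c = i
    · obtain ⟨rfl, rfl⟩ := hrc
      rw [get2_set2_self hsh1 hjn hi, if_pos (by omega), F_step hji,
        max_eq_right (le_of_lt hgt)]
    · have hne : ¬ (r = j ∧ c = i) := hrc
      rw [get2_set2_other (by tauto) _, get2_set2_other (by tauto) _, hcell r c hr hc,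
        if_congr (show ((i+1 ≤ c ∧ r ≤ c) ∨ (c = i ∧ j+1 ≤ r ∧ r ≤ i)) ↔
          ((i+1 ≤ c ∧ r ≤ c) ∨ (c = i ∧ j ≤ r ∧ r ≤ i)) by omega) rfl rfl]
  · rw [if_neg hgt]
    refine ⟨by omega, hsh1, rfl, ?_⟩
    intro r c hr hc
    by_cases hrc : r = j ∧ c = i
    · obtain ⟨rfl, rfl⟩ := hrc
      rw [hd1self, if_pos (by omega), F_step hji, max_eq_left (by omega)]
    · have hne : ¬ (r = j ∧ c = i) := hrc
      rw [get2_set2_other (by tauto) _, hcell r c hr hc,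
        if_congr (show ((i+1 ≤ c ∧ r ≤ c) ∨ (c = i ∧ j+1 ≤ r ∧ r ≤ i)) ↔
          ((i+1 ≤ c ∧ r ≤ c) ∨ (c = i ∧ j ≤ r ∧ r ≤ i)) by omega) rfl rfl]

theorem outA_step (arr : List Int) :
    ∀ t dp, InvA arr (t+1) dp → InvA arr t (outerA arr dp t) := by
  rintro i dp ⟨ht, hsh, hcell⟩
  have hi : i < arr.length := by omega
  have hinit : InnA arr i i (set2 dp i i (arr.getD i 0), arr.getD i 0) := by
    refine ⟨le_refl i, shape_set2 hsh _ _ _, (seg_self hi).symm, ?_⟩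
    intro r c hr hc
    by_cases hrc : r = i ∧ c = i
    · obtain ⟨rfl, rfl⟩ := hrc
      rw [get2_set2_self hsh hi hi, if_pos (by omega), F_self]
    · have hne : ¬ (r = i ∧ c = i) := hrc
      rw [get2_set2_other (by tauto) _, hcell r c hr hc,
        if_congr (show (i+1 ≤ c ∧ r ≤ c) ↔
          ((i+1 ≤ c ∧ r ≤ c) ∨ (c = i ∧ i ≤ r ∧ r ≤ i)) by omega) rfl rfl]
  have hfin := foldRevInv (innerA arr i) (InnA arr i) (innA_step arr i hi) i _ hinit
  obtain ⟨_, hshf, _, hcellf⟩ := hfin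
  refine ⟨by omega, ?_, ?_⟩
  · simpa only [outerA] using hshf
  · intro r c hr hc
    simp only [outerA]
    rw [hcellf r c hr hc,
      if_congr (show ((i+1 ≤ c ∧ r ≤ c) ∨ (c = i ∧ 0 ≤ r ∧ r ≤ i)) ↔
        (i ≤ c ∧ r ≤ c) by omega) rfl rfl]

theorem innB_step (arr : List Int) (j : Nat) :
    ∀ u st, j ≤ u → u < arr.length → InnB arr j u st →
      InnB arr j (u+1) (innerB arr st u) := by
  rintro u ⟨row, s, m⟩ hju hun ⟨_, _, hlen, hcell, h0, h1⟩
  simp only at hlen hcell h0 h1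
  have hstep : innerB arr (row, s, m) u =
      (row.set u (s + arr.getD u 0 - min m s), s + arr.getD u 0, min m s) := rfl
  rw [hstep]
  have hval : s + arr.getD u 0 - min m s = F arr j u := by
    by_cases hj : u = j
    · subst hj
      obtain ⟨hs, hm⟩ := h0 rfl
      rw [hs, hm, F_self]
      simp
    · have hju' : j < u := by omega
      obtain ⟨hs, hfm⟩ := h1 hju'
      have hk := F_kadane arr (u - 1 - j) j (by omega)
      rw [show j + (u - 1 - j) = u - 1 by omega, show u - 1 + 1 = u by omega] at hk
      rw [hk]
      omega
  refine ⟨by omega, by omega, by simp [hlen], ?_, by omega, ?_⟩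
  · intro c hc
    by_cases hcu : c = u
    · subst hcu
      rw [getD_set_self _ _ _ _ (by omega), if_pos (by omega), hval]
    · rw [getD_set_ne _ _ _ (fun h => hcu h.symm), hcell c hc,
        if_congr (show (j ≤ c ∧ c < u) ↔ (j ≤ c ∧ c < u + 1) by omega) rfl rfl]
  · intro _
    constructor
    · simp only [Nat.add_sub_cancel]
      by_cases hj : u = j
      · subst hj
        obtain ⟨hs, _⟩ := h0 rfl
        rw [hs, seg_self hun]; ring
      · obtain ⟨hs, _⟩ := h1 (by omega)
        have hsn := seg_snoc (arr := arr) (show j ≤ u - 1 by omega)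
          (by omega : (u-1) + 1 < arr.length)
        rw [show u - 1 + 1 = u by omega] at hsn
        rw [hs, hsn]
    · simp only [Nat.add_sub_cancel]
      exact hval

theorem rowB_spec (arr : List Int) (j : Nat) (hj : j < arr.length) :
    (rowB arr j).length = arr.length ∧
      ∀ c, c < arr.length → (rowB arr j).getD c 0 =
        if j ≤ c then F arr j c else 0 := by
  have hinit : InnB arr j j (List.replicate arr.length 0, 0, 0) := by
    refine ⟨le_refl j, by omega, by simp, ?_, fun _ => ⟨rfl, rfl⟩, fun h => absurd h (by omega)⟩
    intro c hc
    rw [if_neg (by omega)]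
    simp [List.getD, hc]
  have hfold := foldFwdInv (innerB arr) (InnB arr j) (arr.length - j) j _
    (fun t s ht ht' hI => innB_step arr j t s ht (by omega) hI) hinit
  rw [show j + (arr.length - j) = arr.length by omega] at hfold
  obtain ⟨_, _, hlen, hcell, _, _⟩ := hfold
  refine ⟨hlen, ?_⟩
  intro c hc
  rw [rowB] at *
  rw [hcell c hc, if_congr (show (j ≤ c ∧ c < arr.length) ↔ j ≤ c by omega) rfl rfl]

theorem foldl_append_rows (arr : List Int) :
    ∀ (l : List Nat) (init : List (List Int)),
      l.foldl (fun dp j => dp ++ [rowB arr j]) init = init ++ l.map (rowB arr) := by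
  intro l
  induction l with
  | nil => intro init; simp
  | cons x xs ih => intro init; simp [ih]

theorem alt_eq_map (arr : List Int) :
    get_dp2_alt arr = (List.range arr.length).map (rowB arr) := by
  rw [get_dp2_alt, foldl_append_rows]
  simp

theorem shape_replicate (n : Nat) : Shape n (List.replicate n (List.replicate n (0:Int))) := by
  refine ⟨by simp, ?_⟩
  intro r hr
  rw [List.getD, List.getElem?_replicate, if_pos hr]
  simp

theorem inv_init_cells (n : Nat) : ∀ r c : Nat,
    get2 (List.replicate n (List.replicate n (0:Int))) r c = 0 := by
  intro r c
  simp only [get2, List.getD, List.getElem?_replicate]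
  by_cases hr : r < n <;> by_cases hc : c < n <;> simp [hr, hc]

theorem get_dp2_eq (arr : List Int) : get_dp2 arr = get_dp2_alt arr := by
  have hA : InvA arr arr.length (List.replicate arr.length (List.replicate arr.length 0)) := by
    refine ⟨le_refl _, shape_replicate _, ?_⟩
    intro r c hr hc
    rw [inv_init_cells, if_neg (by omega)]
  have hAf := foldRevInv (outerA arr) (InvA arr) (outA_step arr) arr.length _ hA
  obtain ⟨_, hshA, hcA⟩ := hAf
  have hBrow : ∀ r, r < arr.length →
      (get_dp2_alt arr).getD r [] = rowB arr r := by
    intro r hr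
    rw [alt_eq_map, List.getD,
      List.getElem?_eq_getElem (by simpa using hr)]
    simp
  have hshB : Shape arr.length (get_dp2_alt arr) := by
    refine ⟨by rw [alt_eq_map]; simp, ?_⟩
    intro r hr
    rw [hBrow r hr]
    exact (rowB_spec arr r hr).1
  rw [show get_dp2 arr =
      (List.range arr.length).reverse.foldl (outerA arr)
        (List.replicate arr.length (List.replicate arr.length 0)) from rfl]
  apply table_ext hshA hshB
  intro r c hr hc
  rw [hcA r c hr hc, get2, hBrow r hr, (rowB_spec arr r hr).2 c hc,
    if_congr (show (0 ≤ c ∧ r ≤ c) ↔ r ≤ c by omega) rfl rfl]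

-- ===== VERDICT (by name: the statement is the Claim_ definition above) =====
theorem get_dp2_spec : Claim_equal_get_dp2 := by
  intro arr _
  unfold Spec_get_dp2
  exact get_dp2_eq arr
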